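-- pv_equiv track=rewrite | github.com/IMIO/ideabox.policy | src/ideabox/policy/content/project.py | generate_rejected_time_line
-- ===== SOURCE A (Python) =====
-- def generate_rejected_time_line(state, history):
--     # Status rejected
--     draft_date = ''
--     deposited_date = ''
--     project_analysis_date = ''
--     vote_date = ''
--     result_analysis_date = ''
--     rejected_date = ''
--
--     for status in history:
--         if status.get('review_state') == 'rejected' \
--            and rejected_date == '' \
--            and state == 'result_analysis':
--             rejected_date = status.get('time')
--         if status.get('review_state') == 'result_analysis' \
--            and result_analysis_date == '' \
--            and state in ['rejected', 'result_analysis']: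
--             result_analysis_date = status.get('time')
--         if status.get('review_state') == 'vote' \
--            and vote_date == '' \
--            and state in ['rejected', 'result_analysis', 'vote']:
--             vote_date = status.get('time')
--         if status.get('review_state') == 'project_analysis' \
--            and project_analysis_date == '' \
--            and state in ['rejected', 'result_analysis', 'vote', 'project_analysis']:
--             project_analysis_date = status.get('time')
--         if status.get('review_state') == 'deposited' \
--            and deposited_date == '' \
--            and state in ['rejected', 'result_analysis', 'vote', 'project_analysis', 'deposited']:
--             deposited_date = status.get('time')
--         if status.get('review_state') == 'draft' and draft_date == '':
--             draft_date = status.get('time')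
--     return [draft_date, deposited_date, project_analysis_date, vote_date, result_analysis_date, rejected_date]
-- ===== SOURCE B (Python) =====
-- def generate_rejected_time_line(state, history):
--     # One pass: first non-empty timestamp per review_state; then table-driven gated selection.
--     firsts = {}
--     for status in history:
--         rs = status.get('review_state')
--         if firsts.get(rs, '') == '':
--             firsts[rs] = status.get('time')
--     gates = [('draft', None),
--              ('deposited', ('rejected', 'result_analysis', 'vote', 'project_analysis', 'deposited')),
--              ('project_analysis', ('rejected', 'result_analysis', 'vote', 'project_analysis')),
--              ('vote', ('rejected', 'result_analysis', 'vote')),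
--              ('result_analysis', ('rejected', 'result_analysis')),
--              ('rejected', ('result_analysis',))]
--     return [firsts.get(rs, '') if gate is None or state in gate else ''
--             for rs, gate in gates]
-- ===== Notes on version B (the rewrite author's own statement) =====
-- stated objective: simpler
-- what changed: Replaces six per-field guarded assignments inside the loop by one generic loop recording the first non-empty timestamp per review_state in a dict, followed by a loop-free table-driven gated selection of the six fields.
import Mathlib
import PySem

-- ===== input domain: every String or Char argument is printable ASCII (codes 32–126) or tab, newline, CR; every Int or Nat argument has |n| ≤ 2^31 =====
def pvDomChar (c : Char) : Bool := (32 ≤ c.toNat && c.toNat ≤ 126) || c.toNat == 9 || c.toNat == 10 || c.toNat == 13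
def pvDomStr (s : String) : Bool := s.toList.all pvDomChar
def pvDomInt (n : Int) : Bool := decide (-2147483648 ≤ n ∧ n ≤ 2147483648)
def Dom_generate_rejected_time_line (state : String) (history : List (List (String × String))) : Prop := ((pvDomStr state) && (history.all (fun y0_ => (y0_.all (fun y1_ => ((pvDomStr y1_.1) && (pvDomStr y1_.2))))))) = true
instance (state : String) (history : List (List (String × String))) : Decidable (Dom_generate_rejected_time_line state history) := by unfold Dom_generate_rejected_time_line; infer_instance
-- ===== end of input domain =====

-- B replaces the six guarded in-loop assignments by one generic first-non-empty-per-state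
-- dict pass plus a loop-free table-driven gated selection (objective: simpler).

-- ===== PORT A =====
-- loop body of A's for-loop over history (six guarded first-assignments)
def pvStepA (state : String)
    (acc : Option String × Option String × Option String × Option String × Option String × Option String)
    (status : List (String × String)) :
    Option String × Option String × Option String × Option String × Option String × Option String :=
  let rs := (PySem.Dict.mk status).get? "review_state"
  let t := (PySem.Dict.mk status).get? "time"
  let (d, dep, pa, v, ra, rej) := acc
  let rej := if rs = some "rejected" ∧ rej = some "" ∧ state = "result_analysis" then t else rej
  let ra := if rs = some "result_analysis" ∧ ra = some "" ∧ state ∈ ["rejected", "result_analysis"] then t else ra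
  let v := if rs = some "vote" ∧ v = some "" ∧ state ∈ ["rejected", "result_analysis", "vote"] then t else v
  let pa := if rs = some "project_analysis" ∧ pa = some "" ∧ state ∈ ["rejected", "result_analysis", "vote", "project_analysis"] then t else pa
  let dep := if rs = some "deposited" ∧ dep = some "" ∧ state ∈ ["rejected", "result_analysis", "vote", "project_analysis", "deposited"] then t else dep
  let d := if rs = some "draft" ∧ d = some "" then t else d
  (d, dep, pa, v, ra, rej)

def generate_rejected_time_line (state : String) (history : List (List (String × String))) : List (Option String) :=
  let r := history.foldl (pvStepA state) (some "", some "", some "", some "", some "", some "")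
  [r.1, r.2.1, r.2.2.1, r.2.2.2.1, r.2.2.2.2.1, r.2.2.2.2.2]

-- ===== PORT B =====
-- loop body of B's dict pass: record the first non-empty timestamp per review_state
def pvStepB (f : PySem.Dict (Option String) (Option String)) (status : List (String × String)) :
    PySem.Dict (Option String) (Option String) :=
  let rs := (PySem.Dict.mk status).get? "review_state"
  if f.getD rs (some "") = some "" then f.insert rs ((PySem.Dict.mk status).get? "time") else f

-- B's selection table: (field, gate); gate none = unconditional
def pvGates : List (String × Option (List String)) :=
  [("draft", none),
   ("deposited", some ["rejected", "result_analysis", "vote", "project_analysis", "deposited"]),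
   ("project_analysis", some ["rejected", "result_analysis", "vote", "project_analysis"]),
   ("vote", some ["rejected", "result_analysis", "vote"]),
   ("result_analysis", some ["rejected", "result_analysis"]),
   ("rejected", some ["result_analysis"])]

def generate_rejected_time_line_alt (state : String) (history : List (List (String × String))) : List (Option String) :=
  let firsts := history.foldl pvStepB PySem.Dict.empty
  pvGates.map (fun p =>
    match p.2 with
    | none => firsts.getD (some p.1) (some "")
    | some g => if state ∈ g then firsts.getD (some p.1) (some "") else some "")

-- ===== PRECONDITION & SPEC =====
def Spec_generate_rejected_time_line (state : String) (history : List (List (String × String))) (out : List (Option String)) : Prop := out = generate_rejected_time_line_alt state history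
instance (state : String) (history : List (List (String × String))) (out : List (Option String)) : Decidable (Spec_generate_rejected_time_line state history out) := by unfold Spec_generate_rejected_time_line; infer_instance

-- ===== CLAIM (what is proved, stated in full; the proofs are below) =====
def Claim_equal_generate_rejected_time_line : Prop := ∀ (state : String) (history : List (List (String × String))), Dom_generate_rejected_time_line state history → Spec_generate_rejected_time_line state history (generate_rejected_time_line state history)

-- ===== LEMMAS AND PROOFS =====

lemma pv_getD_stepB (f : PySem.Dict (Option String) (Option String)) (status : List (String × String)) (k : Option String) :
    (pvStepB f status).getD k (some "") =
      (if (PySem.Dict.mk status).get? "review_state" = k ∧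
          f.getD ((PySem.Dict.mk status).get? "review_state") (some "") = some ""
       then (PySem.Dict.mk status).get? "time" else f.getD k (some "")) := by
  unfold pvStepB
  by_cases hc : f.getD ((PySem.Dict.mk status).get? "review_state") (some "") = some ""
  · simp only [hc, if_true, and_true]
    rw [PySem.Dict.getD_insert]
    by_cases hk : (PySem.Dict.mk status).get? "review_state" = k
    · simp [hk]
    · simp [hk, Ne.symm hk]
  · simp [hc]

-- one gated field through one loop step
lemma pv_field_step (G : Prop) [Decidable G] (s : String) (cur : Option String)
    (f : PySem.Dict (Option String) (Option String)) (status : List (String × String))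
    (h : cur = if G then f.getD (some s) (some "") else some "") :
    (if (PySem.Dict.mk status).get? "review_state" = some s ∧ cur = some "" ∧ G
       then (PySem.Dict.mk status).get? "time" else cur)
    = if G then (pvStepB f status).getD (some s) (some "") else some "" := by
  rw [pv_getD_stepB]
  by_cases hg : G
  · simp only [hg, if_true, and_true] at h ⊢
    subst h
    by_cases hr : (PySem.Dict.mk status).get? "review_state" = some s <;> simp [hr]
  · simp only [hg, if_false, and_false] at h ⊢
    simp [h]

lemma pv_inv (state : String) (hist : List (List (String × String)))
    (f : PySem.Dict (Option String) (Option String)) (d dep pa v ra rej : Option String)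
    (h1 : d = f.getD (some "draft") (some ""))
    (h2 : dep = if state ∈ ["rejected", "result_analysis", "vote", "project_analysis", "deposited"] then f.getD (some "deposited") (some "") else some "")
    (h3 : pa = if state ∈ ["rejected", "result_analysis", "vote", "project_analysis"] then f.getD (some "project_analysis") (some "") else some "")
    (h4 : v = if state ∈ ["rejected", "result_analysis", "vote"] then f.getD (some "vote") (some "") else some "")
    (h5 : ra = if state ∈ ["rejected", "result_analysis"] then f.getD (some "result_analysis") (some "") else some "")
    (h6 : rej = if state = "result_analysis" then f.getD (some "rejected") (some "") else some "") :
    hist.foldl (pvStepA state) (d, dep, pa, v, ra, rej) =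
      ((hist.foldl pvStepB f).getD (some "draft") (some ""),
       (if state ∈ ["rejected", "result_analysis", "vote", "project_analysis", "deposited"] then (hist.foldl pvStepB f).getD (some "deposited") (some "") else some ""),
       (if state ∈ ["rejected", "result_analysis", "vote", "project_analysis"] then (hist.foldl pvStepB f).getD (some "project_analysis") (some "") else some ""),
       (if state ∈ ["rejected", "result_analysis", "vote"] then (hist.foldl pvStepB f).getD (some "vote") (some "") else some ""),
       (if state ∈ ["rejected", "result_analysis"] then (hist.foldl pvStepB f).getD (some "result_analysis") (some "") else some ""),
       (if state = "result_analysis" then (hist.foldl pvStepB f).getD (some "rejected") (some "") else some "")) := by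
  induction hist generalizing f d dep pa v ra rej with
  | nil => simp only [List.foldl_nil]; rw [h1, h2, h3, h4, h5, h6]
  | cons status tail ih =>
    simp only [List.foldl_cons]
    unfold pvStepA
    apply ih
    · have := pv_field_step True "draft" d f status (by simpa using h1)
      simpa using this
    · exact pv_field_step _ "deposited" dep f status h2
    · exact pv_field_step _ "project_analysis" pa f status h3
    · exact pv_field_step _ "vote" v f status h4
    · exact pv_field_step _ "result_analysis" ra f status h5
    · exact pv_field_step _ "rejected" rej f status h6

-- ===== VERDICT (by name: the statement is the Claim_ definition above) =====
theorem generate_rejected_time_line_spec : Claim_equal_generate_rejected_time_line := by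
  intro state history _
  unfold Spec_generate_rejected_time_line generate_rejected_time_line generate_rejected_time_line_alt pvGates
  have h := pv_inv state history PySem.Dict.empty (some "") (some "") (some "") (some "") (some "") (some "")
    (by simp) (by simp) (by simp) (by simp) (by simp) (by simp)
  simp only [h]
  simp
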